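-- pv_equiv track=rewrite | github.com/yjhoon2/Coding_test | Programmers/Level1/모의고사.py | solution
-- ===== SOURCE A (Python) =====
-- def solution(answers):
--     a = [1, 2, 3, 4, 5] # 5
--     b = [2, 1, 2, 3, 2, 4, 2, 5] # 8
--     c = [3, 3, 1, 1, 2, 2, 4 ,4 ,5, 5] # 10
--     supo = [a, b, c]
--
--     score = []
--     res = 0
--     for i, j in enumerate(supo):
--         l = len(j)
--         max = 0
--         for k in range(len(answers)):
--             if answers[k] == j[k%l]:
--                 max += 1
--         if max > res:
--             res = max
--         score.append((i+1, max))
--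
--     answer = []
--     for i in range(len(score)):
--         if score[i][1] == res:
--             answer.append(score[i][0])
--
--
--     return answer
-- ===== SOURCE B (Python) =====
-- def solution(answers):
--     patterns = [[1, 2, 3, 4, 5], [2, 1, 2, 3, 2, 4, 2, 5], [3, 3, 1, 1, 2, 2, 4, 4, 5, 5]]
--     # Bucket the answers into a histogram keyed by (position mod 40, value):
--     # 40 = lcm(5, 8, 10), so a bucket fully determines whether each pattern matches.
--     hist = {}
--     for k, v in enumerate(answers):
--         key = (k % 40, v)
--         hist[key] = hist.get(key, 0) + 1
--     scores = []
--     for p in patterns: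
--         s = 0
--         for (r, v), c in hist.items():
--             if v == p[r % len(p)]:
--                 s += c
--         scores.append(s)
--     m = max(scores)
--     return [i + 1 for i, s in enumerate(scores) if s == m]
-- ===== Notes on version B (the rewrite author's own statement) =====
-- stated objective: alternative
-- what changed: A scans the whole answer list once per pattern comparing element by element; B first compresses the answers into a histogram keyed by (index mod 40, value) (40 = lcm of the pattern lengths), then computes each pattern's score from the at most 200 histogram buckets instead of from the raw list.
import Mathlib
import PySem

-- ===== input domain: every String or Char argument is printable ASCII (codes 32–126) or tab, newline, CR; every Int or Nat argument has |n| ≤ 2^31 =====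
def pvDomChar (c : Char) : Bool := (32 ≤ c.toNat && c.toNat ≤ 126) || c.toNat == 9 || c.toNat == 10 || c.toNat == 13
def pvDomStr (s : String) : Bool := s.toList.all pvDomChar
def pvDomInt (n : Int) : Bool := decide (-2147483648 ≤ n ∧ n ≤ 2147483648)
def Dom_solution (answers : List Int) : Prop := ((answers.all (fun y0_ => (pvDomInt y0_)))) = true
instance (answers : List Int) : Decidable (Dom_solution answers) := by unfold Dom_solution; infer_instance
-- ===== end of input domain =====

-- B replaces A's per-pattern rescans of the answer list by first bucketing the answers
-- into a histogram keyed by (index mod 40, value) — 40 = lcm of the pattern lengths —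
-- and scoring each pattern from the histogram buckets (objective: alternative).


-- ===== PORT A =====
def solution (answers : List Int) : List Int :=
  let a : List Int := [1, 2, 3, 4, 5]
  let b : List Int := [2, 1, 2, 3, 2, 4, 2, 5]
  let c : List Int := [3, 3, 1, 1, 2, 2, 4, 4, 5, 5]
  let supo : List (List Int) := [a, b, c]
  let sr :=
    (PySem.List.enumerate supo 0).foldl
      (fun (st : List (Int × Int) × Int) ij =>
        let i := ij.1
        let j := ij.2
        let l : Int := (j.length : Int)
        let mx :=
          (PySem.List.pyRange 0 (answers.length : Int) 1).foldl
            (fun mx k =>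
              if PySem.List.pyGetD answers k 0 = PySem.List.pyGetD j (PySem.Int.mod k l) 0
              then mx + 1 else mx) 0
        let res := if mx > st.2 then mx else st.2
        (st.1 ++ [(i + 1, mx)], res))
      ([], 0)
  let score := sr.1
  let res := sr.2
  (PySem.List.pyRange 0 (score.length : Int) 1).foldl
    (fun ans i =>
      if (PySem.List.pyGetD score i ((0 : Int), (0 : Int))).2 = res
      then ans ++ [(PySem.List.pyGetD score i ((0 : Int), (0 : Int))).1]
      else ans) []

-- ===== PORT B =====
def solution_alt (answers : List Int) : List Int :=
  let patterns : List (List Int) := [[1,2,3,4,5], [2,1,2,3,2,4,2,5], [3,3,1,1,2,2,4,4,5,5]]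
  let hist :=
    (PySem.List.enumerate answers 0).foldl
      (fun (d : PySem.Dict (Int × Int) Int) kv =>
        let key := (PySem.Int.mod kv.1 40, kv.2)
        d.insert key (d.getD key 0 + 1))
      PySem.Dict.empty
  let scores :=
    patterns.foldl
      (fun (sc : List Int) p =>
        let s :=
          hist.items.foldl
            (fun s rvc =>
              if rvc.1.2 = PySem.List.pyGetD p (PySem.Int.mod rvc.1.1 (p.length : Int)) 0
              then s + rvc.2 else s) 0
        sc ++ [s]) []
  -- max(scores): scores always has exactly 3 elements, so max? is some and the default is never used
  let m := (PySem.List.max? scores (fun y => y)).getD 0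
  (PySem.List.enumerate scores 0).filterMap
    (fun is_ => if is_.2 = m then some (is_.1 + 1) else none)

-- ===== PRECONDITION & SPEC =====
def Spec_solution (answers : List Int) (out : List Int) : Prop := out = solution_alt answers
instance (answers : List Int) (out : List Int) : Decidable (Spec_solution answers out) := by unfold Spec_solution; infer_instance

-- ===== CLAIM (what is proved, stated in full; the proofs are below) =====
def Claim_equal_solution : Prop := ∀ (answers : List Int), Dom_solution answers → Spec_solution answers (solution answers)

-- ===== LEMMAS AND PROOFS =====

-- the common value both programs compute per pattern: how many enumerated answers match it
def cntP (p : List Int) (answers : List Int) : Int :=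
  (((PySem.List.enumerate answers 0).countP
      (fun kv => decide (kv.2 = PySem.List.pyGetD p (PySem.Int.mod kv.1 (p.length : Int)) 0)) : Nat) : Int)

-- index loop over pyRange with pyGetD = loop over enumerate
lemma foldl_pyRange_eq_enumerate {β : Type} (full : List Int) (d : Int) (f : β → Int → Int → β) :
    ∀ (k s : Nat) (init : β), s + k = full.length →
    (PySem.List.pyRange (s : Int) (full.length : Int) 1).foldl
        (fun acc i => f acc i (PySem.List.pyGetD full i d)) init
      = (PySem.List.enumerate (full.drop s) (s : Int)).foldl (fun acc kv => f acc kv.1 kv.2) init := by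
  intro k
  induction k with
  | zero =>
      intro s init h
      rw [PySem.List.pyRange_one_eq_nil (by omega), List.drop_of_length_le (by omega)]
      simp [PySem.List.enumerate]
  | succ k ih =>
      intro s init h
      have hs : s < full.length := by omega
      rw [PySem.List.pyRange_one_cons (by exact_mod_cast Nat.lt_of_lt_of_le hs (le_refl _))]
      rw [List.drop_eq_getElem_cons hs, PySem.List.enumerate_cons]
      simp only [List.foldl_cons]
      rw [PySem.List.pyGetD_natCast, List.getD_eq_getElem _ _ hs]
      have : ((s : Int) + 1) = ((s + 1 : Nat) : Int) := by push_cast; ring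
      rw [this]
      exact ih (s + 1) _ (by omega)

-- A's inner loop over indices counts exactly the matching enumerated answers
lemma ascore_eq_cntP (answers p : List Int) :
    (PySem.List.pyRange 0 (answers.length : Int) 1).foldl
        (fun mx k =>
          if PySem.List.pyGetD answers k 0 = PySem.List.pyGetD p (PySem.Int.mod k (p.length : Int)) 0
          then mx + 1 else mx) 0
      = cntP p answers := by
  have h := foldl_pyRange_eq_enumerate answers 0
      (fun (m : Int) (i v : Int) =>
        if v = PySem.List.pyGetD p (PySem.Int.mod i (p.length : Int)) 0 then m + 1 else m)
      answers.length 0 0 (by omega)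
  simp only [Nat.cast_zero, List.drop_zero] at h
  rw [h, PySem.List.foldl_ite_add_one, cntP]
  simp

-- Σ over a duplicate-free index list S of "if k == x then g k else 0" picks out g x
lemma sum_map_ite_eq {α : Type} [BEq α] [LawfulBEq α] (g : α → Int) (x : α) :
    ∀ (S : List α), S.Nodup → x ∈ S →
    (S.map (fun k => if k == x then g k else 0)).sum = g x := by
  intro S
  induction S with
  | nil => intro _ hx; cases hx
  | cons s S ih =>
      intro hnd hx
      simp only [List.map_cons, List.sum_cons]
      rcases List.mem_cons.mp hx with heq | hxS
      · subst heq
        have hz : ∀ k ∈ S, (if k == x then g k else 0) = 0 := by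
          intro k hk
          have hkx : ¬ (k = x) := fun he => (List.nodup_cons.mp hnd).1 (he ▸ hk)
          simp [hkx]
        rw [if_pos (beq_self_eq_true x), List.sum_eq_zero]
        · ring
        · intro y hy
          rcases List.mem_map.mp hy with ⟨k, hk, rfl⟩
          exact hz k hk
      · have hne : ¬ (s = x) := fun he => (List.nodup_cons.mp hnd).1 (he ▸ hxS)
        rw [if_neg (by simpa using hne), ih (List.nodup_cons.mp hnd).2 hxS]
        ring

-- weighted sum of counts over a duplicate-free cover of L = countP of L
lemma sum_counts_eq_countP {α : Type} [BEq α] [LawfulBEq α] (q : α → Bool) :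
    ∀ (L S : List α), S.Nodup → (∀ y ∈ L, y ∈ S) →
    (S.map (fun k => if q k then (L.count k : Int) else 0)).sum = (L.countP q : Int) := by
  intro L
  induction L with
  | nil =>
      intro S _ _
      simp
  | cons x L ih =>
      intro S hnd hcov
      have hx : x ∈ S := hcov x (List.mem_cons_self)
      have hsplit :
          (fun k => if q k then ((x :: L).count k : Int) else 0)
            = fun k => (if q k then (L.count k : Int) else 0)
                + (if k == x then (if q k then (1 : Int) else 0) else 0) := by
        funext k
        by_cases hk : k = x
        · subst hk
          by_cases hq : q k <;> simp [hq, List.count_cons_self]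
        · have hkx : ¬ (x = k) := fun h => hk h.symm
          have hc : (x :: L).count k = L.count k := by
            simp [hkx]
          have hb : (k == x) = false := by simpa using hk
          simp [hc, hb]
      rw [hsplit]
      rw [PySem.List.sum_map_add_int S
        (fun k => if q k then (L.count k : Int) else 0)
        (fun k => if k == x then (if q k then (1 : Int) else 0) else 0)]
      rw [ih S hnd (fun y hy => hcov y (List.mem_cons_of_mem _ hy)),
          sum_map_ite_eq (fun k => if q k then (1 : Int) else 0) x S hnd hx]
      rw [List.countP_cons]
      by_cases hq : q x <;> simp [hq]

-- mod 40 then mod lp is mod lp when lp divides 40 (nonnegative index)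
lemma modmod (lp : Nat) (h : lp ∣ 40) (k : Nat) :
    PySem.Int.mod (PySem.Int.mod (k : Int) 40) (lp : Int) = PySem.Int.mod (k : Int) (lp : Int) := by
  rw [show ((40 : Int)) = ((40 : Nat) : Int) from by norm_num]
  rw [PySem.Int.mod_natCast, PySem.Int.mod_natCast, PySem.Int.mod_natCast]
  exact_mod_cast Nat.mod_mod_of_dvd k h

-- B's histogram pass builds the counter of the bucketed answer list
lemma hist_eq_counter (answers : List Int) :
    (PySem.List.enumerate answers 0).foldl
      (fun (d : PySem.Dict (Int × Int) Int) kv =>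
        d.insert (PySem.Int.mod kv.1 40, kv.2) (d.getD (PySem.Int.mod kv.1 40, kv.2) 0 + 1))
      PySem.Dict.empty
    = PySem.Dict.counter ((PySem.List.enumerate answers 0).map (fun kv => (PySem.Int.mod kv.1 40, kv.2))) := by
  rw [← PySem.Dict.foldl_insert_getD_add_one_eq_counter, List.foldl_map]

-- B's bucket scan for pattern p computes the same match count as A's direct scan
lemma bscore_eq_cntP (answers p : List Int) (hdvd : p.length ∣ 40) :
    ((PySem.List.enumerate answers 0).foldl
        (fun (d : PySem.Dict (Int × Int) Int) kv =>
          d.insert (PySem.Int.mod kv.1 40, kv.2) (d.getD (PySem.Int.mod kv.1 40, kv.2) 0 + 1))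
        PySem.Dict.empty).items.foldl
      (fun s rvc =>
        if rvc.1.2 = PySem.List.pyGetD p (PySem.Int.mod rvc.1.1 (p.length : Int)) 0
        then s + rvc.2 else s) 0
    = cntP p answers := by
  rw [hist_eq_counter, PySem.Dict.items_counter]
  set L := (PySem.List.enumerate answers 0).map (fun kv => (PySem.Int.mod kv.1 40, kv.2)) with hL
  set q : Int × Int → Bool :=
    fun rv => decide (rv.2 = PySem.List.pyGetD p (PySem.Int.mod rv.1 (p.length : Int)) 0) with hq
  have step1 :
      ((PySem.Set.ofList L).map (fun k => (k, (L.count k : Int)))).foldl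
        (fun s rvc =>
          if rvc.1.2 = PySem.List.pyGetD p (PySem.Int.mod rvc.1.1 (p.length : Int)) 0
          then s + rvc.2 else s) 0
      = ((PySem.Set.ofList L).map (fun k => if q k then (L.count k : Int) else 0)).sum := by
    rw [List.foldl_map]
    have key : ∀ (S : List (Int × Int)) (init : Int),
        S.foldl (fun s k => if k.2 = PySem.List.pyGetD p (PySem.Int.mod k.1 (p.length : Int)) 0
            then s + (L.count k : Int) else s) init
        = init + (S.map (fun k => if q k then (L.count k : Int) else 0)).sum := by
      intro S
      induction S with
      | nil => intro init; simp
      | cons a S ihS =>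
          intro init
          simp only [List.foldl_cons, List.map_cons, List.sum_cons, hq]
          by_cases h : a.2 = PySem.List.pyGetD p (PySem.Int.mod a.1 (p.length : Int)) 0
          · rw [if_pos h, if_pos (by simpa using h), ihS]; ring
          · rw [if_neg h, if_neg (by simpa using h), ihS]; ring
    rw [key, zero_add]
  rw [step1,
      sum_counts_eq_countP q L (PySem.Set.ofList L) (PySem.Set.nodup_ofList L)
        (fun y hy => (PySem.Set.mem_ofList L y).mpr hy)]
  rw [hL, List.countP_map, cntP]
  congr 1
  norm_cast
  apply List.countP_congr
  intro kv hkv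
  rcases (PySem.List.mem_enumerate_iff _ _ _).mp hkv with ⟨k, hk, rfl⟩
  simp only [Function.comp, hq, zero_add]
  rw [modmod p.length hdvd k]

-- the triple max via the running-max loop of max?
lemma max3 (s1 s2 s3 : Int) :
    (PySem.List.max? [s1, s2, s3] (fun y => y)).getD 0 = max s1 (max s2 s3) := by
  rw [PySem.List.max?_id_cons]
  simp only [List.foldl_cons, List.foldl_nil, Option.getD_some]
  rw [max_assoc]

theorem solution_eq (answers : List Int) : solution answers = solution_alt answers := by
  simp only [solution, solution_alt]
  rw [show PySem.List.enumerate ([[1,2,3,4,5],[2,1,2,3,2,4,2,5],[3,3,1,1,2,2,4,4,5,5]] : List (List Int)) 0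
      = [(0,[1,2,3,4,5]),(1,[2,1,2,3,2,4,2,5]),(2,[3,3,1,1,2,2,4,4,5,5])] from rfl]
  simp only [List.foldl_cons, List.foldl_nil]
  rw [ascore_eq_cntP answers [1,2,3,4,5],
      ascore_eq_cntP answers [2,1,2,3,2,4,2,5],
      ascore_eq_cntP answers [3,3,1,1,2,2,4,4,5,5]]
  simp only [bscore_eq_cntP answers [1,2,3,4,5] (by decide),
      bscore_eq_cntP answers [2,1,2,3,2,4,2,5] (by decide),
      bscore_eq_cntP answers [3,3,1,1,2,2,4,4,5,5] (by decide)]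
  have h1 : (0 : Int) ≤ cntP [1,2,3,4,5] answers := by rw [cntP]; positivity
  have h2 : (0 : Int) ≤ cntP [2,1,2,3,2,4,2,5] answers := by rw [cntP]; positivity
  have h3 : (0 : Int) ≤ cntP [3,3,1,1,2,2,4,4,5,5] answers := by rw [cntP]; positivity
  generalize cntP [1,2,3,4,5] answers = s1 at *
  generalize cntP [2,1,2,3,2,4,2,5] answers = s2 at *
  generalize cntP [3,3,1,1,2,2,4,4,5,5] answers = s3 at *
  simp only [List.nil_append, List.cons_append, List.length_cons, List.length_nil]
  norm_num
  simp only [max3]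
  rw [show PySem.List.pyRange 0 3 1 = [0, 1, 2] from by decide]
  simp only [List.foldl_cons, List.foldl_nil, List.filterMap_cons, List.filterMap_nil,
    PySem.List.pyGetD_zero_cons]
  rw [show ∀ x y z : Int × Int, PySem.List.pyGetD [x, y, z] 1 (0, 0) = y from by intro x y z; rfl,
      show ∀ x y z : Int × Int, PySem.List.pyGetD [x, y, z] 2 (0, 0) = z from by intro x y z; rfl]
  rw [show (if (if (if 0 < s1 then s1 else 0) < s2 then s2 else if 0 < s1 then s1 else 0) < s3 then s3
      else if (if 0 < s1 then s1 else 0) < s2 then s2 else if 0 < s1 then s1 else 0)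
      = max s1 (max s2 s3) from by simp only [max_def]; split_ifs <;> omega]
  split_ifs <;> simp

-- ===== VERDICT (by name: the statement is the Claim_ definition above) =====
theorem solution_spec : Claim_equal_solution := by
  intro answers _
  exact solution_eq answers
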